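-- pv_equiv track=rewrite | github.com/homebrew9/leetcode_solutions | algorithms/easy/minimum_number_of_operations_to_make_elements_in_array_distinct_v1.py | minimumOperations_1
-- ===== SOURCE A (Python) =====
-- from typing import List
--
-- def minimumOperations_1(nums: List[int]) -> int:
--     N = len(nums)
--     seen = set()
--     for i in range(N-1, -1, -1):
--         if nums[i] in seen:
--             # Avoiding math.ceil
--             v = (i + 1) // 3
--             return v if (i + 1) % 3 == 0 else v + 1
--         seen.add(nums[i])
--     return 0
-- ===== SOURCE B (Python) =====
-- def minimumOperations_1(nums):
--     # Pass 1: last occurrence index of every value.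
--     last = {}
--     for i, v in enumerate(nums):
--         last[v] = i
--     # Pass 2: rightmost index that still has a duplicate to its right.
--     cut = 0
--     for i, v in enumerate(nums):
--         if last[v] > i:
--             cut = i + 1
--     # ceil(cut / 3) size-3 removals.
--     return (cut + 2) // 3
-- ===== Notes on version B (the rewrite author's own statement) =====
-- stated objective: alternative
-- what changed: Replaces A's single backward early-return scan with a growing seen-set by two forward passes: first build a dict mapping each value to its last index, then overwrite a cut point at every index whose value recurs later, finishing with one arithmetic ceiling (cut+2)//3 instead of A's branch.
import Mathlib
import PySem

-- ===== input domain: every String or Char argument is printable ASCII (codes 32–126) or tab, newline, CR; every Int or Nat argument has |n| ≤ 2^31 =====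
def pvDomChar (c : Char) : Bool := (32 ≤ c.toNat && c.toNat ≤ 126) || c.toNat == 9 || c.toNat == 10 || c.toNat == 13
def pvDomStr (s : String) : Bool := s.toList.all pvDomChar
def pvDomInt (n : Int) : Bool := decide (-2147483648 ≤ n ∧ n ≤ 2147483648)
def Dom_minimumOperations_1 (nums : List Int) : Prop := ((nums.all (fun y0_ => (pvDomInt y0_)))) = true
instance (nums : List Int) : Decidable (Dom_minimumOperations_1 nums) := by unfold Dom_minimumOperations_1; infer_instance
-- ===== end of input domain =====

-- B replaces A's single backward early-return scan (with a seen-set) by two forward passes: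
-- build a last-index dict, then overwrite a cut point; objective: alternative decomposition (same cost).

-- ===== PORT A =====
-- A's early return: v = (i+1)//3, then v or v+1 depending on (i+1)%3
def pvCeil3A (i : Int) : Int :=
  let v := PySem.Int.floordiv (i + 1) 3
  if PySem.Int.mod (i + 1) 3 == 0 then v else v + 1

-- the loop 'for i in range(N-1, -1, -1)': k+1 ↦ i = k counts N-1, …, 0
def pvLoopA (nums : List Int) : Nat → PySem.Set Int → Int
  | 0, _ => 0
  | k + 1, seen =>
    -- nums[i] with 0 ≤ i = k < len(nums): always in range, exact
    let x := PySem.List.pyGetD nums (k : Int) 0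
    if seen.contains x then pvCeil3A (k : Int)
    else pvLoopA nums k (PySem.Set.add seen x)

def minimumOperations_1 (nums : List Int) : Int :=
  pvLoopA nums nums.length PySem.Set.empty

-- ===== PORT B =====
def minimumOperations_1_alt (nums : List Int) : Int :=
  -- pass 1: last[v] = last index of v
  let last : PySem.Dict Int Int :=
    (PySem.List.enumerate nums).foldl (fun d p => d.insert p.2 p.1) PySem.Dict.empty
  -- pass 2: cut = 1 + rightmost index whose value recurs later
  let cut : Int :=
    (PySem.List.enumerate nums).foldl
      (fun c p =>
        match last.get? p.2 with   -- last[v]: the key is always present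
        | some j => if j > p.1 then p.1 + 1 else c
        | none => c) 0
  PySem.Int.floordiv (cut + 2) 3

-- ===== PRECONDITION & SPEC =====
def Spec_minimumOperations_1 (nums : List Int) (out : Int) : Prop := out = minimumOperations_1_alt nums
instance (nums : List Int) (out : Int) : Decidable (Spec_minimumOperations_1 nums out) := by unfold Spec_minimumOperations_1; infer_instance

-- ===== CLAIM (what is proved, stated in full; the proofs are below) =====
def Claim_equal_minimumOperations_1 : Prop := ∀ (nums : List Int), Dom_minimumOperations_1 nums → Spec_minimumOperations_1 nums (minimumOperations_1 nums)

-- ===== LEMMAS AND PROOFS =====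

-- index i has a duplicate strictly to its right
def pvDup (nums : List Int) (i : Nat) : Bool :=
  decide (∃ j < nums.length, i < j ∧ nums.getD j 0 = nums.getD i 0)

-- the common shape both ports reduce to: the rightmost duplicated index below k
def pvLastDup (nums : List Int) (k : Nat) : Option Nat :=
  ((List.range k).filter (pvDup nums)).getLast?

-- enumerate as an indexed map
lemma pv_enum_eq (nums : List Int) (k : Int) :
    PySem.List.enumerate nums k
      = (List.range nums.length).map (fun i : Nat => (k + (i : Int), nums.getD i 0)) := by
  induction nums generalizing k with
  | nil => rfl
  | cons x xs ih =>
    show (k, x) :: PySem.List.enumerate xs (k + 1) = _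
    rw [ih (k + 1), List.length_cons, List.range_succ_eq_map, List.map_cons, List.map_map]
    refine congrArg₂ _ (by simp) ?_
    apply List.map_congr_left
    intro i _
    simp only [Function.comp_apply, Nat.succ_eq_add_one, List.getD_cons_succ]
    refine congrArg₂ _ ?_ rfl
    push_cast; ring

-- getLast? of a filtered range: membership, maximality, non-emptiness
lemma pv_getLast_filter_range_mem {p : Nat → Bool} {N m : Nat}
    (h : ((List.range N).filter p).getLast? = some m) : m < N ∧ p m = true := by
  have hm := List.mem_of_getLast? h
  simp only [List.mem_filter, List.mem_range] at hm
  exact hm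

lemma pv_getLast_filter_range_max {p : Nat → Bool} {N m : Nat}
    (h : ((List.range N).filter p).getLast? = some m) :
    ∀ j < N, p j = true → j ≤ m := by
  induction N with
  | zero => intro j hj; omega
  | succ n ih =>
    rw [List.range_succ, List.filter_append] at h
    intro j hj hpj
    by_cases hpn : p n = true
    · rw [show List.filter p [n] = [n] by rw [List.filter_cons, if_pos hpn]; rfl,
          List.getLast?_concat] at h
      have : m = n := by injection h; omega
      omega
    · rw [show List.filter p [n] = [] by rw [List.filter_cons, if_neg hpn]; rfl,
          List.append_nil] at h
      rcases Nat.lt_succ_iff_lt_or_eq.mp hj with h' | h'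
      · exact ih h j h' hpj
      · exact absurd (h' ▸ hpj) hpn

lemma pv_getLast_filter_range_ne_none {p : Nat → Bool} {N i : Nat}
    (hi : i < N) (hpi : p i = true) :
    ((List.range N).filter p).getLast? ≠ none := by
  intro h
  rw [List.getLast?_eq_none_iff] at h
  have : i ∈ (List.range N).filter p := by
    rw [List.mem_filter, List.mem_range]; exact ⟨hi, hpi⟩
  rw [h] at this
  exact List.not_mem_nil this

-- ===== A side =====

lemma pv_loopA_eq (nums : List Int) (k : Nat) (hk : k ≤ nums.length)
    (seen : PySem.Set Int)
    (hseen : ∀ x, seen.contains x = true ↔ ∃ j, k ≤ j ∧ j < nums.length ∧ nums.getD j 0 = x) :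
    pvLoopA nums k seen = (pvLastDup nums k).elim 0 (fun i => pvCeil3A (i : Int)) := by
  induction k generalizing seen with
  | zero => rfl
  | succ k ih =>
    show (if seen.contains (PySem.List.pyGetD nums (k : Int) 0) then _
          else pvLoopA nums k (PySem.Set.add seen (PySem.List.pyGetD nums (k : Int) 0))) = _
    rw [PySem.List.pyGetD_natCast]
    have hdup : seen.contains (nums.getD k 0) = pvDup nums k := by
      rcases h : pvDup nums k with _ | _
      · simp only [pvDup, decide_eq_false_iff_not] at h
        push_neg at h
        by_contra hc
        rw [Bool.not_eq_false] at hc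
        obtain ⟨j, hj1, hj2, hj3⟩ := (hseen _).mp hc
        exact absurd hj3 (h j hj2 (by omega))
      · simp only [pvDup, decide_eq_true_iff] at h
        obtain ⟨j, hj1, hj2, hj3⟩ := h
        exact (hseen _).mpr ⟨j, by omega, hj1, hj3⟩
    rw [hdup]
    unfold pvLastDup
    rw [List.range_succ, List.filter_append]
    by_cases h' : pvDup nums k = true
    case neg =>
      rw [Bool.not_eq_true] at h'
      rw [show List.filter (pvDup nums) [k] = [] by
            rw [List.filter_cons, if_neg (by rw [h']; simp)]; rfl,
          List.append_nil, if_neg (by rw [h']; simp)]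
      refine ih (by omega) _ ?_
      intro x
      constructor
      · intro hx
        rcases (PySem.Set.mem_add _ _ _).mp ((PySem.Set.contains_iff _ _).mp hx) with hx' | hx'
        · obtain ⟨j, hj1, hj2, hj3⟩ := (hseen x).mp ((PySem.Set.contains_iff _ _).mpr hx')
          exact ⟨j, by omega, hj2, hj3⟩
        · exact ⟨k, le_refl _, by omega, hx'.symm⟩
      · rintro ⟨j, hj1, hj2, hj3⟩
        apply (PySem.Set.contains_iff _ _).mpr
        apply (PySem.Set.mem_add _ _ _).mpr
        by_cases hjk : j = k
        · right; rw [← hj3, hjk]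
        · exact Or.inl ((PySem.Set.contains_iff _ _).mp ((hseen x).mpr ⟨j, by omega, hj2, hj3⟩))
    case pos =>
      rw [show List.filter (pvDup nums) [k] = [k] by
            rw [List.filter_cons, if_pos h']; rfl,
          List.getLast?_concat, if_pos h']
      rfl

-- ===== B side =====

-- the last-index dict lookup keeps the last insertion per key
lemma pv_last_get (l : List (Int × Int)) (d : PySem.Dict Int Int) (v : Int) :
    ((l.foldl (fun d p => d.insert p.2 p.1) d).get? v)
      = ((l.filter (fun p => p.2 == v)).getLast?.elim (d.get? v) (fun p => some p.1)) := by
  induction l generalizing d with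
  | nil => rfl
  | cons p l ih =>
    rw [List.foldl_cons, ih, List.filter_cons]
    by_cases hp : p.2 = v
    · rw [if_pos (by rw [hp]; exact BEq.rfl), List.getLast?_cons]
      rcases ht : (l.filter (fun q => q.2 == v)).getLast? with _ | q
      · rw [ht]
        simp [PySem.Dict.get?_insert, hp]
      · rw [ht]
        simp
    · rw [if_neg (by simp [hp])]
      rcases ht : (l.filter (fun q => q.2 == v)).getLast? with _ | q
      · rw [ht]
        simp only [Option.elim_none]
        rw [PySem.Dict.get?_insert, if_neg (Ne.symm hp)]
      · rw [ht]
        simp only [Option.elim_some]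

-- the overwrite loop keeps the last passing element
lemma pv_foldl_overwrite {α : Type} (q : α → Bool) (f : α → Int) (l : List α) (c : Int) :
    l.foldl (fun c p => if q p then f p else c) c = ((l.filter q).getLast?.elim c f) := by
  induction l generalizing c with
  | nil => rfl
  | cons p l ih =>
    rw [List.foldl_cons, ih, List.filter_cons]
    by_cases hp : q p = true
    · rw [if_pos hp, if_pos hp, List.getLast?_cons]
      rcases ht : (l.filter q).getLast? with _ | r
      · simp only [Option.getD_none, Option.elim_none, Option.elim_some]
      · simp only [Option.getD_some, Option.elim_some]
    · rw [if_neg hp, if_neg hp]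

lemma pv_alt_eq (nums : List Int) :
    minimumOperations_1_alt nums
      = PySem.Int.floordiv (((pvLastDup nums nums.length).elim 0 (fun i => (i : Int) + 1)) + 2) 3 := by
  unfold minimumOperations_1_alt
  set N := nums.length with hN
  set last : PySem.Dict Int Int :=
    (PySem.List.enumerate nums).foldl (fun d p => d.insert p.2 p.1) PySem.Dict.empty with hlast
  have henum : PySem.List.enumerate nums 0
      = (List.range N).map (fun i : Nat => ((i : Int), nums.getD i 0)) := by
    rw [pv_enum_eq]; simp [hN]
  have hbody : ∀ (c : Int) (p : Int × Int),
      (match last.get? p.2 with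
        | some j => if j > p.1 then p.1 + 1 else c
        | none => c)
      = (if (match last.get? p.2 with
              | some j => decide (j > p.1)
              | none => false) = true then p.1 + 1 else c) := by
    intro c p
    rcases last.get? p.2 with _ | j
    · rfl
    · by_cases h : j > p.1 <;> simp [h]
  -- the per-index test is pvDup
  have htest : ∀ i, i ∈ List.range N →
      (match last.get? ((fun t : Nat => ((t : Int), nums.getD t 0)) i).2 with
        | some j => decide (j > ((fun t : Nat => ((t : Int), nums.getD t 0)) i).1)
        | none => false) = pvDup nums i := by
    intro i hiR
    have hi : i < N := List.mem_range.mp hiR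
    have hget : last.get? (nums.getD i 0)
        = (((List.range N).filter (fun t => nums.getD t 0 == nums.getD i 0)).getLast?.elim
            none (fun t => some ((t : Int)))) := by
      rw [hlast, show PySem.List.enumerate nums = PySem.List.enumerate nums 0 from rfl, henum,
          pv_last_get, List.filter_map, List.getLast?_map,
          show ((fun p : Int × Int => p.2 == nums.getD i 0) ∘ (fun t : Nat => ((t : Int), nums.getD t 0)))
              = (fun t : Nat => nums.getD t 0 == nums.getD i 0) from rfl]
      cases ((List.range N).filter (fun t : Nat => nums.getD t 0 == nums.getD i 0)).getLast? <;> rfl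
    rcases h : ((List.range N).filter (fun t => nums.getD t 0 == nums.getD i 0)).getLast? with _ | m
    · exact absurd h (pv_getLast_filter_range_ne_none hi (by simp))
    · simp only []
      rw [hget, h, Option.elim_some]
      obtain ⟨hmN, hmv⟩ := pv_getLast_filter_range_mem h
      have hmax := pv_getLast_filter_range_max h
      rcases hd : pvDup nums i with _ | _
      · simp only [pvDup, decide_eq_false_iff_not] at hd
        push_neg at hd
        have hmi : m ≤ i := by
          by_contra hmi
          push_neg at hmi
          exact absurd (beq_iff_eq.mp hmv) (hd m hmN (by omega))
        exact decide_eq_false (by push_cast; omega)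
      · simp only [pvDup, decide_eq_true_iff] at hd
        obtain ⟨j, hj1, hj2, hj3⟩ := hd
        have : j ≤ m := hmax j hj1 (by rw [beq_iff_eq]; exact hj3)
        exact decide_eq_true (by push_cast; omega)
  show PySem.Int.floordiv
      ((((PySem.List.enumerate nums).foldl
        (fun c p =>
          match last.get? p.2 with
          | some j => if j > p.1 then p.1 + 1 else c
          | none => c) 0)) + 2) 3 = _
  rw [show (PySem.List.enumerate nums) = PySem.List.enumerate nums 0 from rfl, henum,
      PySem.List.foldl_congr_mem
        ((List.range N).map (fun i : Nat => ((i : Int), nums.getD i 0)))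
        (fun c p =>
          match last.get? p.2 with
          | some j => if j > p.1 then p.1 + 1 else c
          | none => c)
        (fun c p =>
          if (match last.get? p.2 with
              | some j => decide (j > p.1)
              | none => false) = true then p.1 + 1 else c)
        0
        (fun acc x _ => hbody acc x),
      List.foldl_map,
      pv_foldl_overwrite
        (q := fun t : Nat => (match last.get? ((fun t : Nat => ((t : Int), nums.getD t 0)) t).2 with
                | some j => decide (j > ((fun t : Nat => ((t : Int), nums.getD t 0)) t).1)
                | none => false))
        (f := fun t : Nat => ((fun t : Nat => ((t : Int), nums.getD t 0)) t).1 + 1),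
      List.filter_congr htest]
  unfold pvLastDup
  rcases h : ((List.range N).filter (pvDup nums)).getLast? with _ | m
  · rfl
  · rfl

-- the two ceiling computations agree
lemma pv_ceil_eq (i : Nat) : pvCeil3A (i : Int) = PySem.Int.floordiv (((i : Int) + 1) + 2) 3 := by
  unfold pvCeil3A
  rw [show ((i : Int) + 1) = ((i + 1 : Nat) : Int) by push_cast; ring,
      show (((i + 1 : Nat) : Int) + 2) = ((i + 3 : Nat) : Int) by push_cast; ring,
      show ((3 : Int)) = ((3 : Nat) : Int) from rfl,
      PySem.Int.floordiv_natCast, PySem.Int.floordiv_natCast, PySem.Int.mod_natCast]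
  by_cases h : (i + 1) % 3 = 0
  · rw [if_pos (by simp; omega)]
    have : (i + 3) / 3 = (i + 1) / 3 := by omega
    rw [this]
  · rw [if_neg (by simp; omega)]
    have : (i + 3) / 3 = (i + 1) / 3 + 1 := by omega
    rw [this]; push_cast; ring

-- ===== VERDICT (by name: the statement is the Claim_ definition above) =====
theorem minimumOperations_1_spec : Claim_equal_minimumOperations_1 := by
  intro nums _
  show minimumOperations_1 nums = minimumOperations_1_alt nums
  rw [pv_alt_eq]
  unfold minimumOperations_1
  rw [pv_loopA_eq nums nums.length (le_refl _) PySem.Set.empty (by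
    intro x
    constructor
    · intro h; exact absurd ((PySem.Set.contains_iff _ _).mp h) List.not_mem_nil
    · rintro ⟨j, hj1, hj2, _⟩; omega)]
  rcases h : pvLastDup nums nums.length with _ | m
  · rfl
  · exact pv_ceil_eq m
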